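-- pv_equiv track=rewrite | github.com/prashantlv/programs.py | codeforces/4A.py | check
-- ===== SOURCE A (Python) =====
-- def check(w):
--
-- 	li = []
-- 	for i in range(2,w,2):
-- 		for j in range(2,w,2):
-- 			if i + j == w:
-- 				li.append('Y')
-- 			else:
-- 				li.append('N')
-- 	return li
-- ===== SOURCE B (Python) =====
-- def check(w):
--     vals = list(range(2, w, 2))
--     n = len(vals)
--     li = []
--     for i in vals:
--         row = ['N'] * n
--         t = w - i
--         if t % 2 == 0 and 2 <= t < w:
--             row[(t - 2) // 2] = 'Y'
--         li.extend(row)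
--     return li
-- ===== Notes on version B (the rewrite author's own statement) =====
-- stated objective: alternative
-- what changed: The inner pair-by-pair equality scan is removed: each row is built as all-'N' and the unique position of the complement w-i (if it is a valid even value) is computed arithmetically and set to 'Y'.
import Mathlib
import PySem

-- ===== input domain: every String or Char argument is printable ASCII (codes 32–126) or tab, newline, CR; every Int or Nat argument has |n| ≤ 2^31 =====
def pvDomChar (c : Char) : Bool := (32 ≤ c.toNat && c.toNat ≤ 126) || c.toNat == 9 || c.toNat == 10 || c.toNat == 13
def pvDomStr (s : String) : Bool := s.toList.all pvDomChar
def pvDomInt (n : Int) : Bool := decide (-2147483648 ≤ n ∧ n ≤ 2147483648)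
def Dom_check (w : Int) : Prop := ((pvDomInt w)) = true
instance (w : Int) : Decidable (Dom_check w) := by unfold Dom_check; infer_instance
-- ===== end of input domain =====

-- B replaces the inner equality scan by building each row as all-'N' and computing
-- the position of the single 'Y' (if any) arithmetically (objective: alternative).

-- ===== PORT A =====
def check (w : Int) : List String :=
  (PySem.List.pyRange 2 w 2).foldl
    (fun li i =>
      (PySem.List.pyRange 2 w 2).foldl
        (fun li j => li ++ [if i + j = w then "Y" else "N"]) li)
    []

-- ===== PORT B =====
def check_alt (w : Int) : List String :=
  let vals := PySem.List.pyRange 2 w 2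
  let n := vals.length
  vals.foldl
    (fun li i =>
      let t := w - i
      let row : List String := List.replicate n "N"
      let row :=
        if PySem.Int.mod t 2 = 0 ∧ 2 ≤ t ∧ t < w then
          row.set (PySem.Int.floordiv (t - 2) 2).toNat "Y"
        else row
      li ++ row)
    []

-- ===== PRECONDITION & SPEC =====
def Spec_check (w : Int) (out : List String) : Prop := out = check_alt w
instance (w : Int) (out : List String) : Decidable (Spec_check w out) := by unfold Spec_check; infer_instance

-- ===== CLAIM (what is proved, stated in full; the proofs are below) =====
def Claim_equal_check : Prop := ∀ (w : Int), Dom_check w → Spec_check w (check w)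

-- ===== LEMMAS AND PROOFS =====

-- The number of even values in range(2, w, 2).
def pvCount (w : Int) : Nat := if 2 < w then ((w - 1) / 2).toNat else 0

theorem pyRange_two (w : Int) :
    PySem.List.pyRange 2 w 2 = (List.range (pvCount w)).map (fun k : Nat => 2 + 2 * (k : Int)) := by
  unfold PySem.List.pyRange pvCount
  rw [if_neg (by norm_num : ¬ (2:Int) = 0), if_pos (by norm_num : (0:Int) < 2)]
  split_ifs with h
  · have h1 : w - 2 + 2 - 1 = w - 1 := by ring
    rw [h1]
  · rfl

theorem length_pyRange_two (w : Int) :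
    (PySem.List.pyRange 2 w 2).length = pvCount w := by
  rw [pyRange_two]; simp

-- B's row for a given i.
def pvRow (w i : Int) : List String :=
  if PySem.Int.mod (w - i) 2 = 0 ∧ 2 ≤ w - i ∧ w - i < w then
    (List.replicate ((PySem.List.pyRange 2 w 2).length) "N").set
      (PySem.Int.floordiv (w - i - 2) 2).toNat "Y"
  else List.replicate ((PySem.List.pyRange 2 w 2).length) "N"

-- A's inner loop over j equals B's computed row, for i actually produced by the outer range.
theorem row_eq (w i : Int) (hi : i ∈ PySem.List.pyRange 2 w 2) :
    (PySem.List.pyRange 2 w 2).map (fun j => if i + j = w then "Y" else "N") = pvRow w i := by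
  obtain ⟨h2i, hiw, hdvd⟩ := (PySem.List.mem_pyRange_iff_of_pos (by norm_num) i).mp hi
  have h2w : 2 < w := lt_of_le_of_lt h2i hiw
  unfold pvRow
  rw [length_pyRange_two, pyRange_two]
  have hcount : pvCount w = ((w - 1) / 2).toNat := by unfold pvCount; rw [if_pos h2w]
  split_ifs with h
  · -- the complement t = w - i is a valid even value: single 'Y' at (t-2)/2
    obtain ⟨hmod, h2t, htw⟩ := h
    have hdvd2 : (2 : Int) ∣ (w - i) := by
      rw [← PySem.Int.mod_eq_zero_iff_dvd]; exact hmod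
    have hfd : PySem.Int.floordiv (w - i - 2) 2 = (w - i - 2) / 2 := by
      unfold PySem.Int.floordiv
      rw [Int.fdiv_eq_ediv, if_pos (Or.inl (by norm_num))]
      ring
    rw [hfd]
    apply List.ext_getElem
    · simp [hcount]
    · intro k hk1 hk2
      simp only [List.getElem_map, List.getElem_range, List.getElem_set,
        List.getElem_replicate]
      have hk : k < pvCount w := by simpa using hk1
      have hkb : (k : Int) < (w - 1) / 2 := by
        rw [hcount] at hk; omega
      by_cases he : i + (2 + 2 * (k : Int)) = w
      · rw [if_pos he, if_pos (by omega)]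
      · rw [if_neg he, if_neg (by omega)]
  · -- no valid complement: the whole row is 'N'
    apply List.ext_getElem
    · simp [hcount]
    · intro k hk1 hk2
      simp only [List.getElem_map, List.getElem_range, List.getElem_replicate]
      rw [if_neg]
      intro he
      apply h
      have hm : PySem.Int.mod (w - i) 2 = 0 := by
        rw [PySem.Int.mod_eq_zero_iff_dvd]
        omega
      exact ⟨hm, by omega, by omega⟩

-- ===== VERDICT (by name: the statement is the Claim_ definition above) =====
theorem check_spec : Claim_equal_check := by
  intro w _
  show check w = check_alt w
  unfold check check_alt
  simp only []
  apply PySem.List.foldl_congr_mem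
  intro acc i hi
  rw [PySem.List.foldl_append_singleton_eq_map (fun j => if i + j = w then "Y" else "N")]
  rw [row_eq w i hi]
  unfold pvRow
  rfl
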